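-- pv_equiv track=rewrite | github.com/autom8ton/OLC-Python-TeachingMain | exam_Task4_development/task4_L1R5.py | calL1R5
-- ===== SOURCE A (Python) =====
-- def getgradepoint(mark):
--     if mark >= 75:
--         return 1
--     elif mark >= 70:
--         return 2
--     elif mark >= 65:
--         return 3
--     elif mark >= 60:
--         return 4
--     elif mark >= 55:
--         return 5
--     elif mark >= 50:
--         return 6
--     elif mark >= 45:
--         return 7
--     elif mark >= 40:
--         return 8
--     else:
--         return 9
--
-- def calL1R5(result):
--     english = result["English"]
--     hchinese = result["Higher Chinese"]
--     l1 = 0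
--     r5 = 0
--     if english > hchinese:
--         l1 = getgradepoint(english)
--     else:
--         l1 = getgradepoint(hchinese)
--
--     for subject, score in result.items():
--         if subject == "English" or subject == "Higher Chinese":
--             continue
--         else:
--             r5 = r5 + getgradepoint(score)
--
--     return l1 + r5
-- ===== SOURCE B (Python) =====
-- def getgradepoint(mark):
--     if mark >= 75:
--         return 1
--     elif mark >= 70:
--         return 2
--     elif mark >= 65:
--         return 3
--     elif mark >= 60:
--         return 4
--     elif mark >= 55:
--         return 5
--     elif mark >= 50:
--         return 6
--     elif mark >= 45:
--         return 7
--     elif mark >= 40: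
--         return 8
--     else:
--         return 9
--
-- def calL1R5(result):
--     english = result["English"]
--     hchinese = result["Higher Chinese"]
--     total = sum(getgradepoint(score) for score in result.values())
--     return total - getgradepoint(english) - getgradepoint(hchinese) + getgradepoint(max(english, hchinese))
-- ===== Notes on version B (the rewrite author's own statement) =====
-- stated objective: simpler
-- what changed: B sums getgradepoint over ALL subject values and then corrects the total (subtract English and Higher Chinese, add back the better of the two), replacing A's in-loop skip-branch and separate L1 selection with a compute-all-then-adjust shape.
import Mathlib
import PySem

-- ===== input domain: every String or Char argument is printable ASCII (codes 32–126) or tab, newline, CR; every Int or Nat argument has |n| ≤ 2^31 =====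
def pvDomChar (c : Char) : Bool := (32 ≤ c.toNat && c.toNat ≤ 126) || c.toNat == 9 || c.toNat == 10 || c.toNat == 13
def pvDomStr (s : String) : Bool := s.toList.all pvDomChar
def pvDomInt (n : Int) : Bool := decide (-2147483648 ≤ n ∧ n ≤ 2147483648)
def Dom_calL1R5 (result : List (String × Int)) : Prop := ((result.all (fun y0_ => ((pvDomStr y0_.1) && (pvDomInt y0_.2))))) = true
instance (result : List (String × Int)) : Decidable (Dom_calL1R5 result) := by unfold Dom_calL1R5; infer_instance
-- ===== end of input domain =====

-- B replaces A's in-loop skip-branch with "sum grade points of all values, then subtract the two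
-- language grades and add back the better one" — simpler, same O(n) cost.

-- ===== PORT A =====
def getgradepoint (mark : Int) : Int :=
  if mark ≥ 75 then 1
  else if mark ≥ 70 then 2
  else if mark ≥ 65 then 3
  else if mark ≥ 60 then 4
  else if mark ≥ 55 then 5
  else if mark ≥ 50 then 6
  else if mark ≥ 45 then 7
  else if mark ≥ 40 then 8
  else 9

def calL1R5 (result : List (String × Int)) : Int :=
  let d : PySem.Dict String Int := PySem.Dict.mk result
  match d.get? "English", d.get? "Higher Chinese" with
  | some english, some hchinese =>
      let l1 := if english > hchinese then getgradepoint english else getgradepoint hchinese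
      let r5 := d.items.foldl
        (fun r5 p =>
          if p.1 == "English" || p.1 == "Higher Chinese" then r5
          else r5 + getgradepoint p.2) 0
      l1 + r5
  | _, _ => 0   -- KeyError in Python; excluded by Pre_

-- ===== PORT B =====
def calL1R5_alt (result : List (String × Int)) : Int :=
  let d : PySem.Dict String Int := PySem.Dict.mk result
  match d.get? "English" with
  | none => 0   -- KeyError in Python; excluded by Pre_
  | some english =>
    match d.get? "Higher Chinese" with
    | none => 0   -- KeyError in Python; excluded by Pre_
    | some hchinese =>
      let total := (d.values.map getgradepoint).sum
      total - getgradepoint english - getgradepoint hchinese + getgradepoint (max english hchinese)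

-- ===== PRECONDITION & SPEC =====
-- Pre_ requires both language keys to be present (Python raises KeyError otherwise) and the key
-- list to be duplicate-free — the invariant of a Python dict, which the assoc list represents.
def Pre_calL1R5 (result : List (String × Int)) : Prop :=
  (result.map Prod.fst).Nodup ∧ "English" ∈ result.map Prod.fst ∧ "Higher Chinese" ∈ result.map Prod.fst
instance (result : List (String × Int)) : Decidable (Pre_calL1R5 result) := by unfold Pre_calL1R5; infer_instance
def pvWitness_calL1R5 : (List (String × Int)) := [("English", 72), ("Higher Chinese", 81), ("Math", 50)]

def Spec_calL1R5 (result : List (String × Int)) (out : Int) : Prop := out = calL1R5_alt result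
instance (result : List (String × Int)) (out : Int) : Decidable (Spec_calL1R5 result out) := by unfold Spec_calL1R5; infer_instance

-- ===== CLAIM (what is proved, stated in full; the proofs are below) =====
def Claim_equal_calL1R5 : Prop := ∀ (result : List (String × Int)), Dom_calL1R5 result → Pre_calL1R5 result → Spec_calL1R5 result (calL1R5 result)

-- ===== LEMMAS AND PROOFS =====

-- First-match lookup found (k, v): the whole grade-point sum is the sum over the other keys plus v's.
theorem sum_filter_lookup (k : String) (l : List (String × Int)) (v : Int)
    (hnd : (l.map Prod.fst).Nodup)
    (hl : (PySem.Dict.mk l).get? k = some v) :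
    (l.map (fun p => getgradepoint p.2)).sum =
      ((l.filter (fun p => p.1 != k)).map (fun p => getgradepoint p.2)).sum + getgradepoint v := by
  induction l with
  | nil => simp [PySem.Dict.get?] at hl
  | cons a t ih =>
    rw [PySem.Dict.get?_mk_cons] at hl
    simp only [List.map_cons, List.nodup_cons] at hnd
    by_cases hk : a.1 = k
    · rw [if_pos (beq_iff_eq.2 hk)] at hl
      injection hl with hv
      have ht : t.filter (fun p => p.1 != k) = t := by
        apply List.filter_eq_self.2
        intro p hp
        have hmem := List.mem_map_of_mem (f := Prod.fst) hp
        simp only [bne_iff_ne, ne_eq]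
        intro hpk
        rw [hpk, ← hk] at hmem
        exact hnd.1 hmem
      rw [List.filter_cons_of_neg (by simp [hk]), ht]
      simp [← hv]
      ring
    · rw [if_neg (by simpa using hk)] at hl
      have := ih hnd.2 hl
      rw [List.filter_cons_of_pos (by simpa using hk)]
      simp only [List.map_cons, List.sum_cons, this]
      ring

theorem calL1R5_spec_aux (result : List (String × Int)) (h : Pre_calL1R5 result) :
    calL1R5 result = calL1R5_alt result := by
  obtain ⟨hnd, hE, hH⟩ := h
  have hE' : ((PySem.Dict.mk result).get? "English").isSome := by
    rw [← PySem.Dict.contains_eq_isSome_get?]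
    simpa [PySem.Dict.contains_eq_decide_mem_keys, PySem.Dict.keys] using hE
  have hH' : ((PySem.Dict.mk result).get? "Higher Chinese").isSome := by
    rw [← PySem.Dict.contains_eq_isSome_get?]
    simpa [PySem.Dict.contains_eq_decide_mem_keys, PySem.Dict.keys] using hH
  obtain ⟨e, he⟩ := Option.isSome_iff_exists.1 hE'
  obtain ⟨hc, hh⟩ := Option.isSome_iff_exists.1 hH'
  unfold calL1R5 calL1R5_alt
  simp only [he, hh]
  -- A's loop is a sum over the entries whose key is neither language
  have hloop : (PySem.Dict.items (PySem.Dict.mk result)).foldl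
      (fun r5 p => if p.1 == "English" || p.1 == "Higher Chinese" then r5
                   else r5 + getgradepoint p.2) 0 =
      ((result.filter (fun p => !(p.1 == "English" || p.1 == "Higher Chinese"))).map
        (fun p => getgradepoint p.2)).sum := by
    show result.foldl _ 0 = _
    have hcongr : result.foldl
        (fun r5 p => if (p.1 == "English" || p.1 == "Higher Chinese") = true then r5
                     else r5 + getgradepoint p.2) 0 =
        result.foldl
        (fun (r5 : Int) (p : String × Int) =>
          if (!(p.1 == "English" || p.1 == "Higher Chinese")) = true then r5 + getgradepoint p.2
          else r5) 0 := by
      apply PySem.List.foldl_congr_mem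
      intro acc x _
      by_cases hx : (x.1 == "English" || x.1 == "Higher Chinese") = true <;> simp [hx]
    rw [hcongr]
    rw [PySem.List.foldl_if_eq_foldl_filter]
    rw [PySem.List.foldl_add (g := fun (p : String × Int) => getgradepoint p.2)]
    simp
  rw [hloop]
  -- B's total splits off the two language entries
  have hvals : PySem.Dict.values (PySem.Dict.mk result) = result.map Prod.snd := rfl
  have h1 := sum_filter_lookup "English" result e hnd he
  -- the list with English removed still has nodup keys and Higher Chinese looks up to hc
  have hfnd : ((result.filter (fun p => p.1 != "English")).map Prod.fst).Nodup := by
    exact List.Nodup.sublist (List.Sublist.map Prod.fst List.filter_sublist) hnd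
  have hfh : (PySem.Dict.mk (result.filter (fun p => p.1 != "English"))).get? "Higher Chinese" = some hc := by
    clear hloop h1 hE hH hE' hH' he hfnd
    induction result with
    | nil => simp [PySem.Dict.get?] at hh
    | cons a t ih =>
      rw [PySem.Dict.get?_mk_cons] at hh
      simp only [List.map_cons, List.nodup_cons] at hnd
      by_cases hk : a.1 == "Higher Chinese"
      · simp only [hk, if_pos] at hh
        have ha1 : a.1 = "Higher Chinese" := beq_iff_eq.1 hk
        have : (a.1 != "English") = true := by simp [ha1]
        simp only [List.filter_cons, this, if_pos]
        rw [PySem.Dict.get?_mk_cons]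
        simp [hk, hh]
      · simp only [hk, Bool.false_eq_true, if_neg, not_false_iff] at hh
        have := ih hnd.2 hh
        simp only [List.filter_cons]
        by_cases hae : (a.1 != "English") = true
        · simp only [hae, if_pos]
          rw [PySem.Dict.get?_mk_cons]
          simp [hk, this]
        · simp [hae, this]
  have h2 := sum_filter_lookup "Higher Chinese" (result.filter (fun p => p.1 != "English")) hc hfnd hfh
  rw [List.filter_filter] at h2
  have hfilt : (result.filter (fun p => (p.1 != "Higher Chinese") && (p.1 != "English"))) =
      (result.filter (fun p => !(p.1 == "English" || p.1 == "Higher Chinese"))) := by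
    apply List.filter_congr
    intro p _
    by_cases h1 : p.1 = "English"
    · rw [h1]; rfl
    · by_cases h2 : p.1 = "Higher Chinese"
      · rw [h2]; rfl
      · simp [bne, Bool.and_comm]
  rw [hfilt] at h2
  have hmax : (if e > hc then getgradepoint e else getgradepoint hc) = getgradepoint (max e hc) := by
    by_cases hgt : e > hc
    · simp [hgt, max_eq_left (le_of_lt hgt)]
    · simp [hgt, max_eq_right (by omega : e ≤ hc)]
  rw [hmax, hvals]
  have : (result.map Prod.snd).map getgradepoint = result.map (fun p => getgradepoint p.2) := by
    simp [List.map_map, Function.comp]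
  rw [this, h1, h2]
  ring

-- ===== VERDICT (by name: the statement is the Claim_ definition above) =====
theorem calL1R5_spec : Claim_equal_calL1R5 := by
  intro result _ hpre
  exact calL1R5_spec_aux result hpre
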